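-- pv_equiv track=rewrite | github.com/Rebmann-Dev/WayFinder_x | app/agents/local_tool_agent.py | _location_query_candidates
-- ===== SOURCE A (Python) =====
-- def _location_query_candidates(mention: str) -> list[str]:
--     """
--     Expands a user-typed location mention into a priority-ordered list of
--     progressively shorter queries for the substring-match geocoder.
--     """
--     if not mention:
--         return []
--
--     seen: set[str] = set()
--     out: list[str] = []
--
--     def _add(value: str) -> None:
--         value = value.strip(" ,.!?")
--         if value and value.lower() not in seen:
--             seen.add(value.lower())
--             out.append(value)
--
--     _add(mention)
--     before_comma = mention.split(",", 1)[0]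
--     _add(before_comma)
--
--     tokens = [t for t in before_comma.split() if t]
--     for length in range(len(tokens) - 1, 0, -1):
--         _add(" ".join(tokens[:length]))
--
--     return out
-- ===== SOURCE B (Python) =====
-- def _location_query_candidates(mention: str) -> list[str]:
--     # Back-to-front construction with displacement instead of a seen-set:
--     # iterate candidates from LOWEST to HIGHEST priority; each stripped
--     # candidate evicts any case-insensitive duplicate already collected
--     # (a lower-priority one) and appends itself; reversing at the end
--     # gives keep-first dedup in priority order.
--     if not mention:
--         return []
--     before_comma = mention.split(",", 1)[0]
--     tokens = before_comma.split()
--     low_to_high = [" ".join(tokens[:l]) for l in range(1, len(tokens))] + [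
--         before_comma,
--         mention,
--     ]
--     out: list[str] = []
--     for cand in low_to_high:
--         v = cand.strip(" ,.!?")
--         if v:
--             k = v.lower()
--             out = [u for u in out if u.lower() != k]
--             out.append(v)
--     out.reverse()
--     return out
-- ===== Notes on version B (the rewrite author's own statement) =====
-- stated objective: alternative
-- what changed: B eliminates the seen-set entirely: it iterates the candidates in REVERSE priority order (shortest token prefix up to the full mention), each stripped candidate evicting any case-insensitive duplicate already in the accumulator before appending itself, and reverses the accumulator at the end; keep-last dedup on the reversed sequence equals A's keep-first seen-set dedup in priority order.
import Mathlib
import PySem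

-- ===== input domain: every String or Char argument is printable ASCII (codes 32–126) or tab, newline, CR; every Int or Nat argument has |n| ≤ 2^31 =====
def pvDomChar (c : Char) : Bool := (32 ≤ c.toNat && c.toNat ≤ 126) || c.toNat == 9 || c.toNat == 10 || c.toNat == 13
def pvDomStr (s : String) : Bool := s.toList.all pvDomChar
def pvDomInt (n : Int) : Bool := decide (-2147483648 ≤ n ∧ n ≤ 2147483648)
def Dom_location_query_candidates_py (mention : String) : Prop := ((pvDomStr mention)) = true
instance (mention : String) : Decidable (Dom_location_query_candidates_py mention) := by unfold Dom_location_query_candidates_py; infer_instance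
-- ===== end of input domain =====

-- B builds the result back-to-front: candidates are visited from lowest to highest
-- priority, each stripped candidate evicting any case-insensitive duplicate already
-- collected before appending itself, and the list is reversed at the end — no seen-set.


-- ===== PORT A =====
-- the _add closure of A: state = (seen, out)
def pvAddA (st : PySem.Set String × List String) (value : String) : PySem.Set String × List String :=
  let v := PySem.Str.stripChars value " ,.!?"
  if v ≠ "" ∧ PySem.Set.contains st.1 (PySem.Str.lower v) = false then
    (PySem.Set.add st.1 (PySem.Str.lower v), st.2 ++ [v])
  else st

def location_query_candidates_py (mention : String) : List String :=
  if mention = "" then []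
  else
    let st0 : PySem.Set String × List String := (PySem.Set.empty, [])
    let st1 := pvAddA st0 mention
    let before_comma := ((PySem.Str.splitMax? mention "," 1).getD []).headD ""
    let st2 := pvAddA st1 before_comma
    let tokens := (PySem.Str.split₀ before_comma).filter (fun t => t ≠ "")
    let st3 := (PySem.List.pyRange ((tokens.length : Int) - 1) 0 (-1)).foldl
      (fun st length => pvAddA st (PySem.Str.join " " (PySem.List.slice tokens none (some length)))) st2
    st3.2

-- ===== PORT B =====
-- B's displacement step: a new stripped candidate evicts its case-insensitive
-- duplicate (lower priority) from the collected list and is appended at the end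
def pvStepB (out : List String) (cand : String) : List String :=
  let v := PySem.Str.stripChars cand " ,.!?"
  if v ≠ "" then
    (out.filter (fun u => PySem.Str.lower u ≠ PySem.Str.lower v)) ++ [v]
  else out

def location_query_candidates_py_alt (mention : String) : List String :=
  if mention = "" then []
  else
    let before_comma := ((PySem.Str.splitMax? mention "," 1).getD []).headD ""
    let tokens := PySem.Str.split₀ before_comma
    let low_to_high := ((PySem.List.pyRange 1 (tokens.length : Int) 1).map
        (fun l => PySem.Str.join " " (PySem.List.slice tokens none (some l)))) ++ [before_comma, mention]
    (low_to_high.foldl pvStepB []).reverse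

-- ===== PRECONDITION & SPEC =====
def Spec_location_query_candidates_py (mention : String) (out : List String) : Prop := out = location_query_candidates_py_alt mention
instance (mention : String) (out : List String) : Decidable (Spec_location_query_candidates_py mention out) := by unfold Spec_location_query_candidates_py; infer_instance

-- ===== CLAIM (what is proved, stated in full; the proofs are below) =====
def Claim_equal_location_query_candidates_py : Prop := ∀ (mention : String), Dom_location_query_candidates_py mention → Spec_location_query_candidates_py mention (location_query_candidates_py mention)

-- ===== LEMMAS AND PROOFS =====

-- str.split() never yields an empty piece, so A's truthiness filter is vacuous
theorem pv_split₀_go_ne_nil (s cur : List Char) (acc : List (List Char))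
    (hacc : ∀ x ∈ acc, x ≠ []) :
    ∀ x ∈ PySem.Chars.split₀.go s cur acc, x ≠ [] := by
  induction s generalizing cur acc with
  | nil =>
    intro x hx
    unfold PySem.Chars.split₀.go at hx
    split at hx
    · exact hacc x (List.mem_reverse.mp hx)
    · rename_i hne
      rcases List.mem_cons.mp (List.mem_reverse.mp hx) with rfl | h
      · simp only [List.isEmpty_iff] at hne
        simpa using hne
      · exact hacc x h
  | cons c rest ih =>
    intro x hx
    unfold PySem.Chars.split₀.go at hx
    split at hx
    · split at hx
      · exact ih [] acc hacc x hx
      · rename_i hne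
        refine ih [] (cur.reverse :: acc) ?_ x hx
        intro y hy
        rcases List.mem_cons.mp hy with rfl | h
        · simp only [List.isEmpty_iff] at hne
          simpa using hne
        · exact hacc y h
    · exact ih (c :: cur) acc hacc x hx

theorem pv_filter_split₀ (s : String) :
    (PySem.Str.split₀ s).filter (fun t => t ≠ "") = PySem.Str.split₀ s := by
  apply List.filter_eq_self.mpr
  intro t ht
  have h := pv_split₀_go_ne_nil s.toList [] [] (by simp)
  simp only [PySem.Str.split₀, List.mem_map] at ht
  obtain ⟨cs, hcs, rfl⟩ := ht
  refine decide_eq_true (fun hcontra => ?_)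
  exact h cs hcs (by simpa using congrArg String.toList hcontra)

-- keep-first dedup of the stripped nonempty candidates: the common characterization
def pvD : List String → List String
  | [] => []
  | c :: cs =>
    let v := PySem.Str.stripChars c " ,.!?"
    if v = "" then pvD cs
    else v :: (pvD cs).filter (fun u => PySem.Str.lower u ≠ PySem.Str.lower v)

-- A's seen-set fold computes pvD, filtered by the keys not already seen
theorem pvA_fold (cands : List String) :
    ∀ (seen : PySem.Set String) (out : List String),
    (cands.foldl pvAddA (seen, out)).2
      = out ++ (pvD cands).filter
          (fun u => PySem.Set.contains seen (PySem.Str.lower u) = false) := by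
  induction cands with
  | nil => intro seen out; simp [pvD]
  | cons c cs ih =>
    intro seen out
    by_cases hv : PySem.Str.stripChars c " ,.!?" = ""
    · simp only [List.foldl_cons, pvAddA, hv, pvD]
      simp [ih]
    · by_cases hm : PySem.Set.contains seen (PySem.Str.lower (PySem.Str.stripChars c " ,.!?")) = false
      · -- new key: emitted, seen grows
        have hnot : PySem.Str.lower (PySem.Str.stripChars c " ,.!?") ∉ seen := by simpa using hm
        have hA : pvAddA (seen, out) c
            = (PySem.Set.add seen (PySem.Str.lower (PySem.Str.stripChars c " ,.!?")),
               out ++ [PySem.Str.stripChars c " ,.!?"]) := by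
          simp only [pvAddA]
          rw [if_pos ⟨hv, hm⟩]
        rw [List.foldl_cons, hA, ih]
        simp [pvD, if_neg hv, List.filter_filter, hnot]
      · -- key already seen: skipped
        have ht : PySem.Set.contains seen (PySem.Str.lower (PySem.Str.stripChars c " ,.!?")) = true := by
          revert hm; cases PySem.Set.contains seen (PySem.Str.lower (PySem.Str.stripChars c " ,.!?")) <;> simp
        have hA : pvAddA (seen, out) c = (seen, out) := by
          have hneg : ¬(¬PySem.Str.stripChars c " ,.!?" = "" ∧
              PySem.Set.contains seen (PySem.Str.lower (PySem.Str.stripChars c " ,.!?")) = false) := by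
            rw [ht]; simp
          simp only [pvAddA]
          rw [if_neg hneg]
        have hmem : PySem.Str.lower (PySem.Str.stripChars c " ,.!?") ∈ seen := by simpa using ht
        rw [List.foldl_cons, hA, ih]
        simp [pvD, if_neg hv, List.filter_filter, hmem]
        exact List.filter_congr (fun u _ => by
          by_cases hu : PySem.Str.lower u = PySem.Str.lower (PySem.Str.stripChars c " ,.!?") <;>
            simp [hu, hmem])

-- B's displacement fold over the reversed candidates computes pvD reversed
theorem pvB_fold (cands : List String) :
    cands.reverse.foldl pvStepB [] = (pvD cands).reverse := by
  induction cands with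
  | nil => simp [pvD]
  | cons c cs ih =>
    by_cases hv : PySem.Str.stripChars c " ,.!?" = ""
    · simp [pvStepB, hv, pvD, ih]
    · simp [pvStepB, hv, pvD, ih, List.filter_reverse]

-- the countdown prefix range is the reverse of B's counting-up range
theorem pv_range_rev (n : Nat) :
    PySem.List.pyRange ((n : Int) - 1) 0 (-1) = (PySem.List.pyRange 1 (n : Int) 1).reverse := by
  rw [PySem.List.pyRange_neg_one_eq_reverse]
  norm_num

theorem location_query_candidates_py_eq (mention : String) :
    location_query_candidates_py mention = location_query_candidates_py_alt mention := by
  unfold location_query_candidates_py location_query_candidates_py_alt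
  by_cases hm : mention = ""
  · simp [hm]
  · rw [if_neg hm, if_neg hm]
    simp only [pv_filter_split₀]
    set before := ((PySem.Str.splitMax? mention "," 1).getD []).headD "" with hbefore
    set tokens := PySem.Str.split₀ before with htokens
    set f : Int → String :=
      fun l => PySem.Str.join " " (PySem.List.slice tokens none (some l)) with hf
    set cands : List String :=
      [mention, before] ++ (PySem.List.pyRange ((tokens.length : Int) - 1) 0 (-1)).map f
      with hcands
    have hAside :
        ((PySem.List.pyRange ((tokens.length : Int) - 1) 0 (-1)).foldl
            (fun st length => pvAddA st (f length))
            (pvAddA (pvAddA (PySem.Set.empty, ([] : List String)) mention) before)).2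
          = (cands.foldl pvAddA (PySem.Set.empty, [])).2 := by
      rw [hcands]
      simp [List.foldl_map]
    have hBside :
        ((PySem.List.pyRange 1 (tokens.length : Int) 1).map f) ++ [before, mention]
          = cands.reverse := by
      rw [hcands]
      simp [pv_range_rev tokens.length, List.map_reverse]
    rw [hAside, hBside, pvA_fold, pvB_fold]
    simp [PySem.Set.empty]

-- ===== VERDICT (by name: the statement is the Claim_ definition above) =====
theorem location_query_candidates_py_spec : Claim_equal_location_query_candidates_py := by
  intro mention _
  exact location_query_candidates_py_eq mention
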